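-- pv_equiv track=rewrite | github.com/naplr/heap-challenge | domdist.py | _parse
-- ===== SOURCE A (Python) =====
-- def _get_type(s):
--     if (s[0] == '#'):
--         return 'id'
--     elif (s[0] == '.'):
--         return 'cls'
--     else:
--         return 'tag'
--
-- def _normalize_li(li):
--     """
--     Sort the class sections of each tag.
--     """
--     norm_li = []
--     temp_cls_li = []
--     for i in range(len(li)):
--         t = _get_type(li[i])
--         if t == 'cls':
--             temp_cls_li.append(li[i])
--         else:
--             norm_li.extend(sorted(temp_cls_li))
--             norm_li.append(li[i])
--             temp_cls_li = []
--
--     if len(temp_cls_li) > 0: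
--         norm_li.extend(sorted(temp_cls_li))
--
--     return norm_li
--
-- def _parse(s):
--     s = s.strip()
--     li = []
--
--     start_index = 0
--     for i in range(len(s)):
--         if s[i] == ' ':
--             li.append(s[start_index:i])
--             start_index = i+1
--         elif s[i] in ['#', '.']:
--             li.append(s[start_index:i])
--             start_index = i
--
--     li.append(s[start_index:])
--     norm_li = _normalize_li(li)
--
--     return norm_li
-- ===== SOURCE B (Python) =====
-- def _emit(out, pend, tok):
--     # classify one cut token: buffer classes, flush sorted buffer before anything else
--     if tok.startswith('.'):
--         return out, pend + [tok]
--     return out + sorted(pend) + [tok], []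
--
-- def _parse(s):
--     out, pend, cur = [], [], ''
--     for ch in s.strip():
--         if ch == ' ':
--             out, pend = _emit(out, pend, cur)
--             cur = ''
--         elif ch in '#.':
--             out, pend = _emit(out, pend, cur)
--             cur = ch
--         else:
--             cur = cur + ch
--     out, pend = _emit(out, pend, cur)
--     return out + sorted(pend)
-- ===== Notes on version B (the rewrite author's own statement) =====
-- stated objective: alternative
-- what changed: A collects all tokens by index/slice cutting and then normalizes them in a second typed pass; B is a single character scan that builds the current token incrementally and classifies each token as it is cut, keeping a pending-class buffer that is flushed sorted before any non-class token.
-- outside the precondition, e.g. on _parse('#'): A raises IndexError, B returns ['', '#']; on _parse('.'): A raises IndexError, B returns ['', '.']; on _parse(' '): A raises IndexError, B returns ['']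
import Mathlib
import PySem

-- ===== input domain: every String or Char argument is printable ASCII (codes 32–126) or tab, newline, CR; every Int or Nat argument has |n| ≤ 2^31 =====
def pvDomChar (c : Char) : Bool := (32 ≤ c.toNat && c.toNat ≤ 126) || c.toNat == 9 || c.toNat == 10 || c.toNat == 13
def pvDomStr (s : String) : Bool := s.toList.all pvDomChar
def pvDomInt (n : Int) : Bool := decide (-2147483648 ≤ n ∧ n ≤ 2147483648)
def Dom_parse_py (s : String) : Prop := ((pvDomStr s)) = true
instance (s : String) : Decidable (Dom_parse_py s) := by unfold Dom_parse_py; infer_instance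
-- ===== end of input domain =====

-- B fuses A's tokenize-then-normalize two-pass into one character scan with a pending-class buffer (alternative decomposition, same cost).

-- ===== PORT A =====

-- s[0] with _get_type's branches; Python raises IndexError on "" (the `none` case), excluded by Pre_
def pvGetType (t : String) : String :=
  match PySem.Str.pyGet? t 0 with
  | some c => if c = '#' then "id" else if c = '.' then "cls" else "tag"
  | none => "tag"   -- unreachable under Pre_parse_py (IndexError in Python)

def pvNormalizeLi (li : List String) : List String :=
  let r := (PySem.List.pyRange 0 (li.length : Int) 1).foldl
    (fun (p : List String × List String) i =>
      let x := PySem.List.pyGetD li i ""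
      if pvGetType x = "cls" then (p.1, p.2 ++ [x])
      else (p.1 ++ PySem.List.sorted p.2 (fun a => a) false ++ [x], []))
    ([], [])
  if r.2.length > 0 then r.1 ++ PySem.List.sorted r.2 (fun a => a) false else r.1

-- the cutting loop of _parse: li plus the trailing s[start_index:] append
def pvCut (t : String) : List String :=
  let r := (PySem.List.pyRange 0 (PySem.Str.len t) 1).foldl
    (fun (p : List String × Int) i =>
      if PySem.Str.pyGet? t i = some ' ' then
        (p.1 ++ [PySem.Str.slice t (some p.2) (some i)], i + 1)
      else if PySem.Str.pyGet? t i = some '#' ∨ PySem.Str.pyGet? t i = some '.' then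
        (p.1 ++ [PySem.Str.slice t (some p.2) (some i)], i)
      else p)
    ([], 0)
  r.1 ++ [PySem.Str.slice t (some r.2) none]

def parse_py (s : String) : List String :=
  pvNormalizeLi (pvCut (PySem.Str.strip s))

-- ===== PORT B =====

-- one token is classified as it is cut: classes wait in `pend`, anything else flushes sorted(pend) first
def pvEmit (out pend : List String) (tok : String) : List String × List String :=
  if PySem.Str.startswith tok "." then (out, pend ++ [tok])
  else (out ++ PySem.List.sorted pend (fun a => a) false ++ [tok], [])

def pvStepB (p : List String × List String × List Char) (ch : Char) :
    List String × List String × List Char :=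
  if ch = ' ' then
    let e := pvEmit p.1 p.2.1 (String.ofList p.2.2); (e.1, e.2, [])
  else if ch = '#' ∨ ch = '.' then
    let e := pvEmit p.1 p.2.1 (String.ofList p.2.2); (e.1, e.2, [ch])
  else (p.1, p.2.1, p.2.2 ++ [ch])

def parse_py_alt (s : String) : List String :=
  let r := (PySem.Str.strip s).toList.foldl pvStepB ([], [], [])
  let e := pvEmit r.1 r.2.1 (String.ofList r.2.2)
  e.1 ++ PySem.List.sorted e.2 (fun a => a) false

-- ===== PRECONDITION & SPEC =====

-- Pre_ excludes exactly the inputs on which A raises IndexError (an empty cut token: empty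
-- stripped string, a leading '#'/'.', or a space immediately followed by ' ', '#' or '.').
-- The first-char-not-space and last-char-not-space conjuncts are automatic after strip().
def Pre_parse_py (s : String) : Prop :=
  (PySem.Str.strip s).toList ≠ [] ∧
  (PySem.Str.strip s).toList.head? ≠ some ' ' ∧
  (PySem.Str.strip s).toList.head? ≠ some '#' ∧
  (PySem.Str.strip s).toList.head? ≠ some '.' ∧
  List.IsChain (fun x y => x = ' ' → ¬(y = ' ' ∨ y = '#' ∨ y = '.')) (PySem.Str.strip s).toList ∧
  (PySem.Str.strip s).toList.getLast? ≠ some ' '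

instance (s : String) : Decidable (Pre_parse_py s) := by unfold Pre_parse_py; infer_instance

def pvWitness_parse_py : String := "a.b"

def Spec_parse_py (s : String) (out : List String) : Prop := out = parse_py_alt s
instance (s : String) (out : List String) : Decidable (Spec_parse_py s out) := by unfold Spec_parse_py; infer_instance

-- ===== CLAIM (what is proved, stated in full; the proofs are below) =====
def Claim_equal_parse_py : Prop := ∀ (s : String), Dom_parse_py s → Pre_parse_py s → Spec_parse_py s (parse_py s)

-- ===== LEMMAS AND PROOFS =====

-- the common token stream: cut on ' ' (dropped), '#' and '.' (kept as first char of next token)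
def pvToks (cur : List Char) : List Char → List (List Char)
  | [] => [cur]
  | c :: cs =>
      if c = ' ' then cur :: pvToks [] cs
      else if c = '#' ∨ c = '.' then cur :: pvToks [c] cs
      else pvToks (cur ++ [c]) cs

theorem pvToks_nonempty (cs : List Char) : ∀ (cur : List Char),
    (cur = [] → ∃ a rest, cs = a :: rest ∧ ¬(a = ' ' ∨ a = '#' ∨ a = '.')) →
    List.IsChain (fun x y => x = ' ' → ¬(y = ' ' ∨ y = '#' ∨ y = '.')) cs →
    cs.getLast? ≠ some ' ' →
    ∀ l ∈ pvToks cur cs, l ≠ [] := by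
  induction cs with
  | nil =>
    intro cur h1 _ _ l hl
    simp only [pvToks, List.mem_singleton] at hl
    subst hl
    intro hnil
    obtain ⟨a, rest, ha, _⟩ := h1 hnil
    simp at ha
  | cons c cs ih =>
    intro cur h1 h2 h3 l hl
    have hcur : cur ≠ [] ∨ ¬(c = ' ' ∨ c = '#' ∨ c = '.') := by
      by_cases h : cur = []
      · obtain ⟨a, rest, ha, hna⟩ := h1 h
        cases ha
        exact Or.inr hna
      · exact Or.inl h
    by_cases hc : c = ' '
    · subst hc
      have hcur' : cur ≠ [] := by
        rcases hcur with h | h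
        · exact h
        · exact absurd (Or.inl rfl) h
      simp only [pvToks, reduceIte, List.mem_cons] at hl
      rcases hl with h | hl
      · subst h; exact hcur'
      · cases cs with
        | nil => exact absurd rfl h3
        | cons b bs =>
          rw [List.isChain_cons_cons] at h2
          refine ih [] (fun _ => ⟨b, bs, rfl, h2.1 rfl⟩) h2.2 ?_ l hl
          rw [List.getLast?_cons_cons] at h3
          exact h3
    · by_cases hs : c = '#' ∨ c = '.'
      · have hcur' : cur ≠ [] := by
          rcases hcur with h | h
          · exact h
          · exact absurd (Or.inr hs) h
        simp only [pvToks, if_neg hc, if_pos hs, List.mem_cons] at hl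
        rcases hl with h | hl
        · subst h; exact hcur'
        · cases cs with
          | nil =>
            simp only [pvToks, List.mem_singleton] at hl
            subst hl; simp
          | cons b bs =>
            rw [List.isChain_cons_cons] at h2
            refine ih [c] (by simp) h2.2 ?_ l hl
            rw [List.getLast?_cons_cons] at h3
            exact h3
      · have hns : ¬(c = ' ' ∨ c = '#' ∨ c = '.') := by
          intro h; rcases h with h | h
          · exact hc h
          · exact hs h
        simp only [pvToks, if_neg hc, if_neg hs] at hl
        cases cs with
        | nil =>
          simp only [pvToks, List.mem_singleton] at hl
          subst hl; simp
        | cons b bs =>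
          rw [List.isChain_cons_cons] at h2
          refine ih (cur ++ [c]) (by simp) h2.2 ?_ l hl
          rw [List.getLast?_cons_cons] at h3
          exact h3

-- A's index/slice loop produces pvToks
theorem pvA_loop (t : String) : ∀ (m : Nat) (k st : Nat) (acc : List String),
    st ≤ k → k + m = t.toList.length →
    (let r := (PySem.List.pyRange (k : Int) (t.toList.length : Int) 1).foldl
      (fun (p : List String × Int) i =>
        if PySem.Str.pyGet? t i = some ' ' then
          (p.1 ++ [PySem.Str.slice t (some p.2) (some i)], i + 1)
        else if PySem.Str.pyGet? t i = some '#' ∨ PySem.Str.pyGet? t i = some '.' then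
          (p.1 ++ [PySem.Str.slice t (some p.2) (some i)], i)
        else p)
      (acc, (st : Int));
     r.1 ++ [PySem.Str.slice t (some r.2) none])
    = acc ++ (pvToks ((t.toList.drop st).take (k - st)) (t.toList.drop k)).map String.ofList := by
  intro m
  induction m with
  | zero =>
    intro k st acc hst hk
    simp only [Nat.add_zero] at hk
    rw [PySem.List.pyRange_one_eq_nil (by omega)]
    simp only [List.foldl_nil]
    have hdrop : t.toList.drop k = [] := by
      rw [List.drop_eq_nil_iff]; omega
    have hsl : PySem.Str.slice t (some (st : Int)) none
        = String.ofList ((t.toList.drop st).take (k - st)) := by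
      have h1 : (PySem.Str.slice t (some (st : Int)) none).toList = t.toList.drop st := by
        simp [PySem.Str.toList_slice, PySem.List.slice_from_natCast]
      have h2 : (t.toList.drop st).take (k - st) = t.toList.drop st := by
        apply List.take_of_length_le
        rw [List.length_drop]; omega
      rw [h2, ← h1, String.ofList_toList]
    rw [hdrop, hsl, pvToks]
    simp
  | succ m ih =>
    intro k st acc hst hk
    have hklt : k < t.toList.length := by omega
    rw [PySem.List.pyRange_one_cons (by exact_mod_cast hklt)]
    simp only [List.foldl_cons]
    have hget : PySem.Str.pyGet? t (k : Int) = some (t.toList[k]'hklt) := by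
      rw [PySem.Str.pyGet?_natCast]
      exact List.getElem?_eq_getElem hklt
    have hdropk : t.toList.drop k = t.toList[k]'hklt :: t.toList.drop (k + 1) :=
      List.drop_eq_getElem_cons hklt
    have hsl : PySem.Str.slice t (some (st : Int)) (some (k : Int))
        = String.ofList ((t.toList.drop st).take (k - st)) := by
      have h1 : (PySem.Str.slice t (some (st : Int)) (some (k : Int))).toList
          = (t.toList.drop st).take (k - st) := by
        simp [PySem.Str.toList_slice, PySem.List.slice_natCast]
      rw [← h1, String.ofList_toList]
    have hcast : ((k : Int) + 1) = ((k + 1 : Nat) : Int) := by push_cast; ring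
    rw [hcast]
    by_cases hsp : t.toList[k]'hklt = ' '
    · rw [if_pos (by rw [hget, hsp])]
      have := ih (k + 1) (k + 1) (acc ++ [PySem.Str.slice t (some (st : Int)) (some (k : Int))])
        (le_refl _) (by omega)
      simp only at this ⊢
      rw [this, hdropk, pvToks, if_pos hsp]
      simp only [Nat.sub_self, List.take_zero, List.map_cons, hsl]
      simp
    · by_cases hsep : t.toList[k]'hklt = '#' ∨ t.toList[k]'hklt = '.'
      · rw [if_neg (by rw [hget]; intro h; exact hsp (Option.some_injective _ h)),
           if_pos (by rw [hget]; rcases hsep with h | h <;> [exact Or.inl (by rw [h]); exact Or.inr (by rw [h])])]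
        have := ih (k + 1) k (acc ++ [PySem.Str.slice t (some (st : Int)) (some (k : Int))])
          (by omega) (by omega)
        simp only at this ⊢
        rw [this, hdropk, pvToks, if_neg hsp, if_pos hsep]
        have htake1 : List.take (k + 1 - k) (t.toList[k]'hklt :: t.toList.drop (k + 1))
            = [t.toList[k]'hklt] := by
          have h1 : k + 1 - k = 1 := by omega
          rw [h1]
          rfl
        rw [htake1]
        simp only [List.map_cons, hsl]
        simp
      · rw [if_neg (by rw [hget]; intro h; exact hsp (Option.some_injective _ h)),
           if_neg (by rw [hget]; intro h; exact hsep (by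
             rcases h with h | h
             · exact Or.inl (Option.some_injective _ h)
             · exact Or.inr (Option.some_injective _ h)))]
        have := ih (k + 1) st acc (by omega) (by omega)
        simp only at this ⊢
        rw [this, hdropk, pvToks, if_neg hsp, if_neg hsep]
        have htake : (t.toList.drop st).take (k + 1 - st)
            = (t.toList.drop st).take (k - st) ++ [t.toList[k]'hklt] := by
          have h1 : k + 1 - st = (k - st) + 1 := by omega
          rw [h1, List.take_succ]
          have h2 : (t.toList.drop st)[k - st]? = some (t.toList[k]'hklt) := by
            rw [List.getElem?_drop]
            have : st + (k - st) = k := by omega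
            rw [this]
            exact List.getElem?_eq_getElem hklt
          rw [h2]
          rfl
        rw [htake]

-- A's normalize = element-level fold, then flush
def pvNStep (p : List String × List String) (x : String) : List String × List String :=
  if pvGetType x = "cls" then (p.1, p.2 ++ [x])
  else (p.1 ++ PySem.List.sorted p.2 (fun a => a) false ++ [x], [])

theorem pvNormalizeLi_eq (li : List String) :
    pvNormalizeLi li =
      (let r := li.foldl pvNStep ([], []);
       if r.2.length > 0 then r.1 ++ PySem.List.sorted r.2 (fun a => a) false else r.1) := by
  have h : (fun (p : List String × List String) i =>
      let x := PySem.List.pyGetD li i ""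
      if pvGetType x = "cls" then (p.1, p.2 ++ [x])
      else (p.1 ++ PySem.List.sorted p.2 (fun a => a) false ++ [x], []))
      = (fun acc j => pvNStep acc (PySem.List.pyGetD li j "")) := rfl
  simp only [pvNormalizeLi, h, PySem.List.foldl_pyRange_zero_pyGetD' li "" pvNStep ([], [])]

-- B's char scan = fold of pvEmit over the token stream
theorem pvB_loop (cs : List Char) : ∀ (out pend : List String) (cur : List Char),
    (let r := cs.foldl pvStepB (out, pend, cur);
     let e := pvEmit r.1 r.2.1 (String.ofList r.2.2);
     e.1 ++ PySem.List.sorted e.2 (fun a => a) false)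
    = (let q := ((pvToks cur cs).map String.ofList).foldl (fun p tok => pvEmit p.1 p.2 tok) (out, pend);
       q.1 ++ PySem.List.sorted q.2 (fun a => a) false) := by
  induction cs with
  | nil => intro out pend cur; rfl
  | cons c cs ih =>
    intro out pend cur
    by_cases hc : c = ' '
    · subst hc
      simp only [List.foldl_cons, pvStepB, reduceIte, pvToks, List.map_cons]
      exact ih _ _ _
    · by_cases hs : c = '#' ∨ c = '.'
      · simp only [List.foldl_cons, pvStepB, if_neg hc, if_pos hs, pvToks, List.map_cons]
        exact ih _ _ _
      · simp only [List.foldl_cons, pvStepB, if_neg hc, if_neg hs, pvToks]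
        exact ih _ _ _

-- on nonempty tokens the two per-token steps agree
theorem pvStep_agree (toks : List String) : ∀ (p : List String × List String),
    (∀ tok ∈ toks, tok ≠ "") →
    toks.foldl pvNStep p = toks.foldl (fun p tok => pvEmit p.1 p.2 tok) p := by
  induction toks with
  | nil => intro p _; rfl
  | cons t ts ih =>
    intro p hne
    have ht : t.toList ≠ [] := by
      intro h
      exact hne t (List.mem_cons_self) (by
        have := congrArg String.ofList h
        simpa using this)
    obtain ⟨a, rest, ha⟩ := List.exists_cons_of_ne_nil ht
    have hstep : pvNStep p t = pvEmit p.1 p.2 t := by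
      by_cases hd : a = '.'
      · subst hd
        have hpre : (['.'] : List Char) <+: '.' :: rest := ⟨rest, rfl⟩
        simp [pvNStep, pvEmit, pvGetType, ha, 
          PySem.Str.startswith_eq, PySem.Chars.startswith_iff, hpre]
      · have hpre : ¬((['.'] : List Char) <+: a :: rest) := by
          rintro ⟨u, hu⟩
          simp at hu
          exact hd hu.1.symm
        by_cases hh : a = '#'
        · subst hh
          simp [pvNStep, pvEmit, pvGetType, ha, 
            PySem.Str.startswith_eq, PySem.Chars.startswith_iff, hpre]
        · simp [pvNStep, pvEmit, pvGetType, ha, 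
            PySem.Str.startswith_eq, PySem.Chars.startswith_iff, hpre, hh, hd]
    simp only [List.foldl_cons, hstep]
    exact ih _ (fun tok htok => hne tok (List.mem_cons_of_mem _ htok))

-- ===== VERDICT (by name: the statement is the Claim_ definition above) =====
set_option maxHeartbeats 1000000 in
theorem parse_py_spec : Claim_equal_parse_py := by
  intro s _ hpre
  show parse_py s = parse_py_alt s
  obtain ⟨hne, hh1, hh2, hh3, hchain, hlast⟩ := hpre
  obtain ⟨a, rest, haT⟩ := List.exists_cons_of_ne_nil hne
  have hha : (PySem.Str.strip s).toList.head? = some a := by rw [haT]; rfl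
  have h1 : ([] : List Char) = [] →
      ∃ a rest, (PySem.Str.strip s).toList = a :: rest ∧ ¬(a = ' ' ∨ a = '#' ∨ a = '.') := by
    intro _
    refine ⟨a, rest, haT, ?_⟩
    rintro (h | h | h)
    · exact hh1 (h ▸ hha)
    · exact hh2 (h ▸ hha)
    · exact hh3 (h ▸ hha)
  have htoksne := pvToks_nonempty (PySem.Str.strip s).toList [] h1 hchain hlast
  have htokSne : ∀ tok ∈ (pvToks [] (PySem.Str.strip s).toList).map String.ofList, tok ≠ "" := by
    intro tok htok
    obtain ⟨l, hl, rfl⟩ := List.mem_map.1 htok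
    intro hemp
    apply htoksne l hl
    have := congrArg String.toList hemp
    simpa using this
  have hcut : pvCut (PySem.Str.strip s)
      = (pvToks [] (PySem.Str.strip s).toList).map String.ofList :=
    pvA_loop (PySem.Str.strip s) (PySem.Str.strip s).toList.length 0 0 [] (le_refl 0) (by omega)
  have hB : parse_py_alt s =
      (let q := ((pvToks [] (PySem.Str.strip s).toList).map String.ofList).foldl
        (fun p tok => pvEmit p.1 p.2 tok) ([], []);
       q.1 ++ PySem.List.sorted q.2 (fun a => a) false) :=
    pvB_loop (PySem.Str.strip s).toList [] [] []
  show pvNormalizeLi (pvCut (PySem.Str.strip s)) = parse_py_alt s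
  rw [hcut, pvNormalizeLi_eq, pvStep_agree _ _ htokSne, hB]
  simp only []
  generalize (((pvToks [] (PySem.Str.strip s).toList).map String.ofList).foldl
    (fun p tok => pvEmit p.1 p.2 tok) ([], [])) = q
  rcases q with ⟨o, pend⟩
  cases pend with
  | nil => simp [PySem.List.sorted]
  | cons x xs => simp
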